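-- pv_equiv track=rewrite | github.com/Jahidul007/Python-Bootcamp | coding_intereview/1071. Greatest Common Divisor of Strings.py | gcdOfStrings
-- ===== SOURCE A (Python) =====
-- def gcdOfStrings(str1: str, str2: str) -> str:
--
--     if str1 + str2 != str2 + str1:
--         return ""
--     if str2 == str1:
--         return str1
--     l1 = len(str1)
--     l2 = len(str2)
--     while (l2):
--         l1, l2 = l2, l1 % l2
--     return str2[0:l1]
-- ===== SOURCE B (Python) =====
-- def gcdOfStrings(str1: str, str2: str) -> str:
--     # Euclidean reduction on the strings themselves: repeatedly replace the
--     # longer string by its remainder after stripping whole copies of the shorter.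
--     a, b = str1, str2
--     while b:
--         q = len(a) // len(b)
--         n = q * len(b)
--         if a[:n] != b * q:
--             return ""
--         a, b = b, a[n:]
--     return a
-- ===== Notes on version B (the rewrite author's own statement) =====
-- stated objective: alternative
-- what changed: B runs the Euclidean algorithm on the strings themselves (repeatedly stripping whole copies of the shorter string from the longer, verifying each step), instead of A's one-shot concatenation-commutativity test followed by a numeric gcd of the lengths.
-- intended difference: On inputs with str2 == '' and str1 != '', A slices the empty str2 and returns '', while B returns str1, the intended value (gcd(x, '') = x, matching A's own result on the symmetric input str1 == ''). — e.g. on gcdOfStrings("a", ""): A returns "", B returns "a"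
import Mathlib
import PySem

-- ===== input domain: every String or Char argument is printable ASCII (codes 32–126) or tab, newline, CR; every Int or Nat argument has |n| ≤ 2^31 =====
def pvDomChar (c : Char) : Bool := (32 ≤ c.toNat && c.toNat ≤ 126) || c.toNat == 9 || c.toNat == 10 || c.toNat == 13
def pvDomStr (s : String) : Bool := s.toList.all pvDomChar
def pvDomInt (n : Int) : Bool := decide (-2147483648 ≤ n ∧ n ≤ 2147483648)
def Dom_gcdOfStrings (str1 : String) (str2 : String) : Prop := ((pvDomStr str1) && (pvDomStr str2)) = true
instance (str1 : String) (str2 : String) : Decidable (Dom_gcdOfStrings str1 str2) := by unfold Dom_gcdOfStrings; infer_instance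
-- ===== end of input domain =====

-- B replaces A's concatenation-commutativity test + numeric gcd of lengths by the Euclidean algorithm run on the strings themselves (alternative decomposition, similar cost); on str2 = "" with str1 nonempty A returns "" while B returns str1 (stated as D_ below).


-- ===== PORT A =====
-- the 'while l2: l1, l2 = l2, l1 % l2' loop of A
def pvEuclid (l1 l2 : Nat) : Nat :=
  if h : l2 = 0 then l1 else pvEuclid l2 (l1 % l2)
termination_by l2
decreasing_by exact Nat.mod_lt _ (Nat.pos_of_ne_zero h)

def gcdOfStrings (str1 : String) (str2 : String) : String :=
  if str1.toList ++ str2.toList ≠ str2.toList ++ str1.toList then ""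
  else if str2.toList = str1.toList then str1
  else
    -- l1 = final value of the while loop on (len(str1), len(str2)); return str2[0:l1]
    String.ofList (PySem.List.slice str2.toList (some 0)
      (some ((pvEuclid str1.toList.length str2.toList.length : Nat) : Int)))

-- ===== PORT B =====
-- b * q  (Python string repetition)
def pvRep (w : List Char) (q : Nat) : List Char := (List.replicate q w).flatten

-- B's while loop; a[:n] / a[n:] with n = q*len(b) ≥ 0 are exactly take/drop
def pvGcdLoop (a b : List Char) : List Char :=
  if hb : b = [] then a
  else if a.take (a.length / b.length * b.length) = pvRep b (a.length / b.length) then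
    pvGcdLoop b (a.drop (a.length / b.length * b.length))
  else []
termination_by b.length
decreasing_by
  have hpos : 0 < b.length := List.length_pos_iff.mpr hb
  have h1 := Nat.div_add_mod a.length b.length
  have h2 := Nat.mod_lt a.length hpos
  have h3 := Nat.mul_comm b.length (a.length / b.length)
  simp only [List.length_drop]
  omega

def gcdOfStrings_alt (str1 : String) (str2 : String) : String :=
  String.ofList (pvGcdLoop str1.toList str2.toList)

-- ===== PRECONDITION & SPEC =====
-- On str2 == "" with str1 != "", A slices the empty str2 and returns "" while B returns str1,
-- the intended value (gcd(x, "") = x, matching A's own result on the symmetric input str1 == "").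
def D_gcdOfStrings (str1 : String) (str2 : String) : Prop := str2 = "" ∧ str1 ≠ ""
instance (str1 : String) (str2 : String) : Decidable (D_gcdOfStrings str1 str2) := by unfold D_gcdOfStrings; infer_instance

def Spec_gcdOfStrings (str1 : String) (str2 : String) (out : String) : Prop := ¬ D_gcdOfStrings str1 str2 → out = gcdOfStrings_alt str1 str2
instance (str1 : String) (str2 : String) (out : String) : Decidable (Spec_gcdOfStrings str1 str2 out) := by unfold Spec_gcdOfStrings; infer_instance

def pvDiffWitness_gcdOfStrings : String × String := ("a", "")
def pvDiffWitnessOut_gcdOfStrings : String × String := ("", "a")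

-- ===== CLAIM (what is proved, stated in full; the proofs are below) =====
def Claim_unchanged_gcdOfStrings : Prop := ∀ (str1 : String) (str2 : String), Dom_gcdOfStrings str1 str2 → Spec_gcdOfStrings str1 str2 (gcdOfStrings str1 str2)
def Claim_changed_gcdOfStrings : Prop := Dom_gcdOfStrings (pvDiffWitness_gcdOfStrings.1) (pvDiffWitness_gcdOfStrings.2) ∧ D_gcdOfStrings (pvDiffWitness_gcdOfStrings.1) (pvDiffWitness_gcdOfStrings.2) ∧ gcdOfStrings (pvDiffWitness_gcdOfStrings.1) (pvDiffWitness_gcdOfStrings.2) = pvDiffWitnessOut_gcdOfStrings.1 ∧ gcdOfStrings_alt (pvDiffWitness_gcdOfStrings.1) (pvDiffWitness_gcdOfStrings.2) = pvDiffWitnessOut_gcdOfStrings.2 ∧ pvDiffWitnessOut_gcdOfStrings.1 ≠ pvDiffWitnessOut_gcdOfStrings.2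
def Claim_exact_gcdOfStrings : Prop := ∀ (str1 : String) (str2 : String), Dom_gcdOfStrings str1 str2 → D_gcdOfStrings str1 str2 → gcdOfStrings str1 str2 ≠ gcdOfStrings_alt str1 str2

-- ===== LEMMAS AND PROOFS =====

theorem pvEuclid_eq_gcd (l2 l1 : Nat) : pvEuclid l1 l2 = Nat.gcd l1 l2 := by
  induction l2 using Nat.strong_induction_on generalizing l1 with
  | _ l2 ih =>
    rw [pvEuclid]
    by_cases h : l2 = 0
    · simp [h]
    · rw [dif_neg h, ih (l1 % l2) (Nat.mod_lt _ (Nat.pos_of_ne_zero h)) l2,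
        Nat.gcd_comm l2, ← Nat.gcd_rec, Nat.gcd_comm]

theorem pvRep_succ (w : List Char) (n : Nat) : pvRep w (n + 1) = w ++ pvRep w n := by
  simp [pvRep, List.replicate_succ]

-- if a commutes with b, its q·|b|-prefix is q copies of b
theorem take_pow (b : List Char) : ∀ (q : Nat) (a : List Char),
    a ++ b = b ++ a → q * b.length ≤ a.length → a.take (q * b.length) = pvRep b q := by
  intro q
  induction q with
  | zero => intro a _ _; simp [pvRep]
  | succ q ih =>
    intro a hcomm hle
    have hlb : b.length ≤ a.length := by nlinarith [Nat.succ_mul q b.length]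
    have htb : a.take b.length = b := by
      have := congrArg (List.take b.length) hcomm.symm
      rw [List.take_left, List.take_append_of_le_length hlb] at this
      exact this.symm
    have ha : a = b ++ a.drop b.length := by
      conv_lhs => rw [← List.take_append_drop b.length a, htb]
    set d := a.drop b.length with hd
    have hcomm' : d ++ b = b ++ d := by
      have h' := hcomm
      rw [ha, List.append_assoc] at h'
      exact List.append_cancel_left h'
    have hld : q * b.length ≤ d.length := by
      have hlen : a.length = b.length + d.length := by conv_lhs => rw [ha]; simp
      have hsm : (q + 1) * b.length = q * b.length + b.length := by ring
      omega
    rw [pvRep_succ, Nat.succ_mul, Nat.add_comm (q * b.length) b.length]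
    conv_lhs => rw [ha]
    rw [List.take_length_add_append, ih d hcomm' hld]

-- characterization of B's loop
theorem gcdLoop_char_aux : ∀ (N : Nat) (b a : List Char), b.length < N →
    pvGcdLoop a b = if a ++ b = b ++ a then (b ++ a).take (Nat.gcd a.length b.length) else [] := by
  intro N
  induction N with
  | zero => intro b a h; omega
  | succ N ihN =>
    intro b a hN
    have ih : ∀ (r : List Char), r.length < b.length → ∀ a' : List Char,
        pvGcdLoop a' r = if a' ++ r = r ++ a' then (r ++ a').take (Nat.gcd a'.length r.length) else [] := by
      intro r hr a'
      exact ihN r a' (by omega)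
    rw [pvGcdLoop]
    by_cases hb : b = []
    · subst hb
      simp [Nat.gcd_zero_right]
    · rw [dif_neg hb]
      have hpos : 0 < b.length := List.length_pos_iff.mpr hb
      set q := a.length / b.length with hq
      set n := q * b.length with hn
      have hnle : n ≤ a.length := by
        rw [hn, hq]
        exact Nat.div_mul_le_self _ _
      by_cases hstep : a.take n = pvRep b q
      · rw [if_pos hstep]
        set r := a.drop n with hr
        have hrl : r.length < b.length := by
          have h1 := Nat.div_add_mod a.length b.length
          have h2 := Nat.mod_lt a.length hpos
          have h3 := Nat.mul_comm b.length (a.length / b.length)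
          simp only [hr, List.length_drop, hn, hq]
          omega
        rw [ih r hrl b]
        have har : a = pvRep b q ++ r := by
          conv_lhs => rw [← List.take_append_drop n a, hstep]
        -- commuting of (a,b) iff commuting of (b,r)
        have hrepcomm : ∀ m : Nat, pvRep b m ++ b = b ++ pvRep b m := by
          intro m
          induction m with
          | zero => simp [pvRep]
          | succ m ihm => rw [pvRep_succ, List.append_assoc, ihm, ← List.append_assoc]
        have hiff : (a ++ b = b ++ a) ↔ (b ++ r = r ++ b) := by
          constructor
          · intro h
            rw [har, List.append_assoc] at h
            conv_rhs at h => rw [← List.append_assoc, ← hrepcomm q, List.append_assoc]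
            exact (List.append_cancel_left h).symm
          · intro h
            rw [har, List.append_assoc, h.symm, ← List.append_assoc, hrepcomm q, List.append_assoc]
        have hgcd : Nat.gcd a.length b.length = Nat.gcd b.length r.length := by
          have hral : r.length = a.length % b.length := by
            have h1 := Nat.div_add_mod a.length b.length
            have h3 := Nat.mul_comm b.length (a.length / b.length)
            simp only [hr, List.length_drop, hn, hq]
            omega
          rw [hral, Nat.gcd_comm b.length, ← Nat.gcd_rec, Nat.gcd_comm]
        by_cases hc : a ++ b = b ++ a
        · rw [if_pos hc, if_pos (hiff.mp hc), hgcd]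
          set g := Nat.gcd b.length r.length with hg
          have hgb : g ≤ b.length := Nat.le_of_dvd hpos (hg ▸ Nat.gcd_dvd_left _ _)
          rw [List.take_append_of_le_length hgb]
          by_cases hre : r = []
          · rw [hre]
            simp
          · have hgr : g ≤ r.length :=
              Nat.le_of_dvd (List.length_pos_iff.mpr hre) (hg ▸ Nat.gcd_dvd_right _ _)
            rw [List.take_append_of_le_length hgr]
            have hcomm' := hiff.mp hc
            have h1 := congrArg (List.take g) hcomm'
            rw [List.take_append_of_le_length hgb, List.take_append_of_le_length hgr] at h1
            exact h1.symm
        · rw [if_neg hc, if_neg (fun h => hc (hiff.mpr h))]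
      · rw [if_neg hstep]
        have hc : ¬ (a ++ b = b ++ a) := by
          intro hcomm
          exact hstep (take_pow b q a hcomm hnle)
        rw [if_neg hc]

theorem gcdLoop_char (b a : List Char) :
    pvGcdLoop a b = if a ++ b = b ++ a then (b ++ a).take (Nat.gcd a.length b.length) else [] :=
  gcdLoop_char_aux (b.length + 1) b a (Nat.lt_succ_self _)

-- ===== VERDICT (by name: the statement is the Claim_ definition above) =====
theorem gcdOfStrings_spec : Claim_unchanged_gcdOfStrings := by
  intro str1 str2 _ hD
  unfold gcdOfStrings gcdOfStrings_alt
  rw [gcdLoop_char]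
  simp only [PySem.List.slice_zero_start, PySem.List.slice_to_natCast, pvEuclid_eq_gcd]
  set s1 := str1.toList with hs1
  set s2 := str2.toList with hs2
  by_cases hc : s1 ++ s2 = s2 ++ s1
  · rw [if_neg (not_not_intro hc), if_pos hc]
    by_cases h2 : s2 = []
    · have hstr2 : str2 = "" := by
        rw [← String.ofList_toList (s := str2), ← hs2, h2]
      have hstr1 : str1 = "" := by
        simp only [D_gcdOfStrings, not_and, not_not] at hD
        exact hD hstr2
      have h1 : s1 = [] := by rw [hs1, hstr1]; rfl
      rw [if_pos (by rw [h1, h2]), h1, h2]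
      simp [hstr1]
    · have hpos : 0 < s2.length := List.length_pos_iff.mpr h2
      have hgle : Nat.gcd s1.length s2.length ≤ s2.length :=
        Nat.le_of_dvd hpos (Nat.gcd_dvd_right _ _)
      rw [List.take_append_of_le_length hgle]
      by_cases heq : s2 = s1
      · rw [if_pos heq, heq, Nat.gcd_self, List.take_length]
        rw [hs1, String.ofList_toList]
      · rw [if_neg heq]
  · rw [if_pos hc, if_neg hc]

theorem gcdOfStrings_changed : Claim_changed_gcdOfStrings := by
  unfold Claim_changed_gcdOfStrings
  refine ⟨by decide, by decide, ?_, ?_, by decide⟩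
  · show gcdOfStrings "a" "" = ""
    unfold gcdOfStrings
    rw [if_neg (by decide), if_neg (by decide)]
    simp [PySem.List.slice]
  · show gcdOfStrings_alt "a" "" = "a"
    unfold gcdOfStrings_alt
    rw [pvGcdLoop, dif_pos (show ("" : String).toList = [] by rfl)]
    exact String.ofList_toList

theorem gcdOfStrings_tight : Claim_exact_gcdOfStrings := by
  intro str1 str2 _ hD
  obtain ⟨h2, h1⟩ := hD
  subst h2
  have h1l : str1.toList ≠ [] := by
    intro h
    exact h1 (by rw [← String.ofList_toList (s := str1), h])
  have hA : gcdOfStrings str1 "" = "" := by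
    unfold gcdOfStrings
    have c1 : ¬(str1.toList ++ ("" : String).toList ≠ ("" : String).toList ++ str1.toList) := by simp
    have c2 : ("" : String).toList ≠ str1.toList := fun h => h1l h.symm
    rw [if_neg c1, if_neg c2]
    simp [PySem.List.slice]
  have hB : gcdOfStrings_alt str1 "" = str1 := by
    unfold gcdOfStrings_alt
    rw [pvGcdLoop, dif_pos (show ("" : String).toList = [] by rfl)]
    exact String.ofList_toList
  rw [hA, hB]
  exact fun h => h1 h.symm
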